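-- pv_equiv track=rewrite | github.com/vchernoy/coding | contests/2018/codejam2018/qualification/go_gopher/go_gopher.py | dim
-- ===== SOURCE A (Python) =====
-- import math
--
-- def dim(a):
--     w1 = int(math.sqrt(a))
--     h1 = (a + w1 - 1) // w1
--     found_wh = []
--     for h0 in range(w1, h1+1):
--         for w0 in range(h0, h1+1):
--             a0 = w0 * h0
--             if a0 >= a:
--                 found_wh.append((w0, h0, a0))
--
--     min_a0 = found_wh[0][2]
--     found_wh = [t for t in found_wh if t[2] == min_a0]
--     found_ww = [t for t in found_wh if t[0] == t[1]]
--     if found_ww: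
--         return found_ww[0][0], found_ww[0][1]
--
--     return found_wh[0][0], found_wh[0][1]
-- ===== SOURCE B (Python) =====
-- import math
--
-- def dim(a):
--     # Single scan of the h0 = w1 row: the first w0 with w0*w1 >= a is the answer
--     # (it is the unique minimum-area candidate, and is the square iff a is a perfect square).
--     w1 = int(math.sqrt(a))
--     h1 = (a + w1 - 1) // w1
--     for w0 in range(w1, h1 + 1):
--         if w0 * w1 >= a:
--             return w0, w1
-- ===== Notes on version B (the rewrite author's own statement) =====
-- stated objective: simpler
-- what changed: Replaces the nested candidate-enumeration loops, min-area filter and square-preference filter by a single scan of the h0=w1 row returning the first w0 with w0*w1 >= a, which is provably the unique minimum-area candidate (and the square exactly when a is a perfect square).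
import Mathlib
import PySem

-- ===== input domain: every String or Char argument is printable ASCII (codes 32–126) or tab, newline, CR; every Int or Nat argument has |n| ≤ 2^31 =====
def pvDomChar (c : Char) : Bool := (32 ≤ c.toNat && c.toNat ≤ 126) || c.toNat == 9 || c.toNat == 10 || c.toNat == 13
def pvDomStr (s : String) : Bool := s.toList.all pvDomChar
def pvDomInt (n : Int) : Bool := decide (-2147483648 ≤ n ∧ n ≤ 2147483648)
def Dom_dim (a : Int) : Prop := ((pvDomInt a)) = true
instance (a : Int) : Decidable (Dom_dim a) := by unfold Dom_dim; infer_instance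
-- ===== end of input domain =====

-- B replaces A's nested candidate enumeration, min-area filter and square-preference filter by
-- one scan of the h0 = w1 row, returning the first w0 with w0*w1 >= a (objective: simpler).

-- ===== PORT A =====
-- int(math.sqrt(a)) is ported as Int.sqrt: exact on the domain |a| ≤ 2^31; a < 0 (math.sqrt
-- ValueError) and a = 0 (ZeroDivisionError in //) are excluded by Pre_dim.
def dim (a : Int) : Int × Int :=
  let w1 : Int := Int.sqrt a
  let h1 : Int := PySem.Int.floordiv (a + w1 - 1) w1
  let found_wh : List (Int × Int × Int) :=
    (PySem.List.pyRange w1 (h1 + 1) 1).foldl (fun acc h0 =>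
      (PySem.List.pyRange h0 (h1 + 1) 1).foldl (fun acc2 w0 =>
        let a0 := w0 * h0
        if a0 ≥ a then acc2 ++ [(w0, h0, a0)] else acc2) acc) []
  match found_wh.head? with
  | none => (0, 0)   -- Python raises IndexError here; unreachable under Pre_dim
  | some t0 =>
    let min_a0 := t0.2.2
    let found_wh2 := found_wh.filter (fun t => t.2.2 == min_a0)
    let found_ww := found_wh2.filter (fun t => t.1 == t.2.1)
    match found_ww.head? with
    | some t => (t.1, t.2.1)
    | none   => ((found_wh2.headD (0, 0, 0)).1, (found_wh2.headD (0, 0, 0)).2.1)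

-- ===== PORT B =====
def dim_alt (a : Int) : Int × Int :=
  let w1 : Int := Int.sqrt a
  let h1 : Int := PySem.Int.floordiv (a + w1 - 1) w1
  match (PySem.List.pyRange w1 (h1 + 1) 1).find? (fun w0 => decide (w0 * w1 ≥ a)) with
  | some w0 => (w0, w1)
  | none    => (0, 0)   -- Python B falls off the loop (None); unreachable under Pre_dim

-- ===== PRECONDITION & SPEC =====
-- Pre_dim excludes exactly a ≤ 0, where A raises (ValueError from math.sqrt for a < 0,
-- ZeroDivisionError for a = 0 since w1 = 0).
def Pre_dim (a : Int) : Prop := 1 ≤ a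
instance (a : Int) : Decidable (Pre_dim a) := by unfold Pre_dim; infer_instance
def pvWitness_dim : Int := 7
def Spec_dim (a : Int) (out : Int × Int) : Prop := out = dim_alt a
instance (a : Int) (out : Int × Int) : Decidable (Spec_dim a out) := by unfold Spec_dim; infer_instance

-- ===== CLAIM (what is proved, stated in full; the proofs are below) =====
def Claim_equal_dim : Prop := ∀ (a : Int), Dom_dim a → Pre_dim a → Spec_dim a (dim a)

-- ===== LEMMAS AND PROOFS =====

-- For a ≥ 1, w = Int.sqrt a satisfies 1 ≤ w, w*w ≤ a < (w+1)*(w+1).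
theorem dim_sqrt_bounds (a : Int) (ha : 1 ≤ a) :
    1 ≤ Int.sqrt a ∧ Int.sqrt a * Int.sqrt a ≤ a ∧ a < (Int.sqrt a + 1) * (Int.sqrt a + 1) := by
  have hta : ((a.toNat : Int)) = a := Int.toNat_of_nonneg (by omega)
  have h1 := Nat.sqrt_le a.toNat
  have h2 := Nat.lt_succ_sqrt a.toNat
  have h3 : 0 < Nat.sqrt a.toNat := Nat.sqrt_pos.mpr (by omega)
  unfold Int.sqrt
  refine ⟨by exact_mod_cast h3, ?_, ?_⟩
  · exact_mod_cast (hta ▸ (by exact_mod_cast h1 : ((Nat.sqrt a.toNat * Nat.sqrt a.toNat : Nat) : Int) ≤ (a.toNat : Int)))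
  · have : ((a.toNat : Int)) < ((Nat.sqrt a.toNat + 1) * (Nat.sqrt a.toNat + 1) : Nat) := by exact_mod_cast h2
    push_cast at this
    rwa [hta] at this

-- h = ceil(a / w) bounds: a ≤ h*w and (h-1)*w < a.
theorem dim_ceil_bounds (a w : Int) (hw : 1 ≤ w) :
    a ≤ PySem.Int.floordiv (a + w - 1) w * w ∧ (PySem.Int.floordiv (a + w - 1) w - 1) * w < a := by
  have h := (PySem.Int.floordiv_eq_iff_of_pos (a := a + w - 1) (b := w) (by omega)).mp rfl
  constructor <;> nlinarith [h.1, h.2]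

-- ===== VERDICT (by name: the statement is the Claim_ definition above) =====
-- A and B both compute (h, w) with w = Int.sqrt a, h = ceil(a/w); proved by the case split
-- h ∈ {w, w+1, w+2} and explicit evaluation of both loops.
theorem dim_spec : Claim_equal_dim := by
  intro a _ hpre
  have hpre' : 1 ≤ a := hpre
  obtain ⟨hw1, hw2, hw3⟩ := dim_sqrt_bounds a hpre'
  unfold Spec_dim
  simp only [dim, dim_alt]
  set w : Int := Int.sqrt a with hwdef
  set h : Int := PySem.Int.floordiv (a + w - 1) w with hhdef
  obtain ⟨hc1, hc2⟩ := dim_ceil_bounds a w hw1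
  rw [← hhdef] at hc1 hc2
  have hwh : w ≤ h := by nlinarith
  have hh2 : h ≤ w + 2 := by nlinarith
  rcases (by omega : h = w ∨ h = w + 1 ∨ h = w + 2) with hcase | hcase | hcase
  · -- h = w : a = w*w, single-element range, square answer (w, w)
    have haw : a = w * w := by nlinarith
    have hr1 : PySem.List.pyRange w (w + 1) 1 = [w] := by
      rw [PySem.List.pyRange_one_cons (by omega), PySem.List.pyRange_one_eq_nil (by omega)]
    rw [hcase]
    simp only [hr1, List.foldl]
    simp [show w * w ≥ a from le_of_eq haw]
  · -- h = w + 1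
    have c1 : ¬ (w * w ≥ a) := by nlinarith
    have c2 : (w + 1) * w ≥ a := by nlinarith
    have c3 : (w + 1) * (w + 1) ≥ a := by nlinarith
    have d1 : ¬ ((w + 1) * (w + 1) = (w + 1) * w) := by nlinarith
    have d2 : ¬ (w + 1 = w) := by omega
    have hr1 : PySem.List.pyRange w (w + 1 + 1) 1 = [w, w + 1] := by
      rw [PySem.List.pyRange_one_cons (by omega), PySem.List.pyRange_one_cons (by omega),
          PySem.List.pyRange_one_eq_nil (by omega)]
    have hr2 : PySem.List.pyRange (w + 1) (w + 1 + 1) 1 = [w + 1] := by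
      rw [PySem.List.pyRange_one_cons (by omega), PySem.List.pyRange_one_eq_nil (by omega)]
    rw [hcase]
    simp only [hr1, hr2, List.foldl]
    simp [c1, c2, c3, d1, d2]
  · -- h = w + 2
    have c1 : ¬ (w * w ≥ a) := by nlinarith
    have c2 : ¬ ((w + 1) * w ≥ a) := by nlinarith
    have c3 : (w + 2) * w ≥ a := by nlinarith
    have c4 : (w + 1) * (w + 1) ≥ a := by nlinarith
    have c5 : (w + 2) * (w + 1) ≥ a := by nlinarith
    have c6 : (w + 2) * (w + 2) ≥ a := by nlinarith
    have d1 : ¬ ((w + 1) * (w + 1) = (w + 2) * w) := by nlinarith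
    have d2 : ¬ ((w + 2) * (w + 1) = (w + 2) * w) := by nlinarith
    have d3 : ¬ ((w + 2) * (w + 2) = (w + 2) * w) := by nlinarith
    have d4 : ¬ (w + 2 = w) := by omega
    have hr1 : PySem.List.pyRange w (w + 2 + 1) 1 = [w, w + 1, w + 2] := by
      rw [PySem.List.pyRange_one_cons (by omega), PySem.List.pyRange_one_cons (by omega),
          PySem.List.pyRange_one_cons (by omega), PySem.List.pyRange_one_eq_nil (by omega)]
      simp only [List.cons.injEq, and_true, true_and]
      omega
    have hr2 : PySem.List.pyRange (w + 1) (w + 2 + 1) 1 = [w + 1, w + 2] := by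
      rw [PySem.List.pyRange_one_cons (by omega), PySem.List.pyRange_one_cons (by omega),
          PySem.List.pyRange_one_eq_nil (by omega)]
      simp only [List.cons.injEq, and_true, true_and]
      omega
    have hr3 : PySem.List.pyRange (w + 2) (w + 2 + 1) 1 = [w + 2] := by
      rw [PySem.List.pyRange_one_cons (by omega), PySem.List.pyRange_one_eq_nil (by omega)]
    rw [hcase]
    simp only [hr1, hr2, hr3, List.foldl]
    simp [c1, c2, c3, c4, c5, c6, d1, d2, d3, d4]
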